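-- pv_equiv track=rewrite | github.com/smy37/Daily_Coding | Contest/supplement/1_3.py | solution
-- ===== SOURCE A (Python) =====
-- def check_limit(A):
--     limit = min(len(A), len(A[0]))
--     for i in range(len(A[0])):
--         temp = 0
--         t_max = 0
--         for j in range(len(A)):
--             if A[j][i] == ".":
--                 temp +=1
--             else:
--                 temp = 0
--             t_max = max(temp, t_max)
--         limit = min(limit, t_max)
--     return limit
--
-- def check_move(s_x, s_y, s, A):
--     for i in range(s):
--         for j in range(s):
--             if A[s_x+i][s_y+j] == "*":
--                 return False
--     return True
--
-- dx = [-1,1,0,0]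
--
-- dy = [0,0,-1,1]
--
-- def solution(N, M, A):
--     answer = 0
--     s = check_limit(A)
--     for i in range(s, 0, -1):
--         e_x = N-i
--         e_y = M-i
--         visited = {}
--         q = []
--         if check_move(0,0, i, A):
--
--             q.append([0,0])
--             visited[(0,0)] = 1
--         else:
--             continue
--         while q:
--             t = q.pop()
--
--             if t == [e_x, e_y]:
--                 return i
--             for j in range(4):
--                 n_x = t[0] + dx[j]
--                 n_y = t[1] + dy[j]
--
--                 if 0<= n_x <= e_x and 0<=n_y <= e_y and (n_x,n_y) not in visited and check_move(n_x,n_y,i,A):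
--                     q.append([n_x,n_y])
--                     visited[(n_x,n_y)] = 1
--     return 0
-- ===== SOURCE B (Python) =====
-- def solution(N, M, A):
--     R = len(A)
--     C = len(A[0])
--     # 2D prefix sums of obstacle counts: P[r][c] = number of '*' in A[0:r][0:c]
--     P = [[0] * (C + 1)]
--     for row in A:
--         pref = [0]
--         acc = 0
--         for ch in row:
--             acc += 1 if ch == '*' else 0
--             pref.append(acc)
--         P.append([p + q for p, q in zip(P[-1], pref)])
--
--     def free(x, y, s):
--         # the s x s square at (x, y) contains no '*' (prefix-sum rectangle query)
--         return P[x + s][y + s] - P[x][y + s] - P[x + s][y] + P[x][y] == 0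
--
--     # upper bound: min over columns of the longest vertical run of '.'
--     limit = min(R, C)
--     for c in range(C):
--         best = 0
--         last = -1
--         for r in range(R):
--             if A[r][c] != '.':
--                 last = r
--             elif r - last > best:
--                 best = r - last
--         limit = min(limit, best)
--
--     for s in range(limit, 0, -1):
--         ex = N - s
--         ey = M - s
--         if not free(0, 0, s):
--             continue
--         stack = [(0, 0)]
--         seen = {(0, 0)}
--         while stack:
--             x, y = stack.pop()
--             if x == ex and y == ey:
--                 return s
--             for nx, ny in ((x - 1, y), (x + 1, y), (x, y - 1), (x, y + 1)):
--                 if 0 <= nx <= ex and 0 <= ny <= ey and (nx, ny) not in seen and free(nx, ny, s):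
--                     seen.add((nx, ny))
--                     stack.append((nx, ny))
--     return 0
-- ===== Notes on version B (the rewrite author's own statement) =====
-- stated objective: alternative
-- what changed: B precomputes a 2D prefix-sum table of obstacle counts once and answers each check_move square test by rectangle arithmetic on the table instead of rescanning the s x s square, and computes the per-column run limit from the last-obstacle index instead of a running-streak counter; the search visits the same cells.
-- outside the precondition, e.g. on solution(3, 2, ['..', '..']): A raises IndexError, B raises IndexError; on solution(3, 2, ['..', '**']): A returns 0, B returns 0
import Mathlib
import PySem

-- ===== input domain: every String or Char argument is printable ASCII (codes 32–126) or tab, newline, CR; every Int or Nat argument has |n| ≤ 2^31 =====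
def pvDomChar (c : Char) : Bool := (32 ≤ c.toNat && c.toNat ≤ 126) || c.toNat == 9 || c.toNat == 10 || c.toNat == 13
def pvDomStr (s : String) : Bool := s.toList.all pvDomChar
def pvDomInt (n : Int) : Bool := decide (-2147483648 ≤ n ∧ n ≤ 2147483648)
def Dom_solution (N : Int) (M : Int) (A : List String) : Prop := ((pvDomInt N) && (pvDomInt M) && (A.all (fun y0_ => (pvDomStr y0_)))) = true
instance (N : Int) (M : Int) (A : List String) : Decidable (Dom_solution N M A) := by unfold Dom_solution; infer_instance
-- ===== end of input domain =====

-- B is an alternative implementation: it precomputes a 2D prefix-sum table of obstacle counts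
-- and answers each check_move square test by table arithmetic instead of rescanning the square,
-- and computes the per-column run limit from the last-obstacle index.

-- ===== PORT A =====

-- A[j] as a list of chars ('' when the row index is out of range; under Pre_ always in range)
def pvRow (A : List String) (j : Int) : List Char :=
  ((PySem.List.pyGet? A j).getD "").toList

-- A[j][i] (' ' when out of range; under Pre_ every use is in range)
def pvCharAt (A : List String) (j i : Int) : Char :=
  (PySem.List.pyGet? (pvRow A j) i).getD ' '

-- check_limit(A)
def checkLimit (A : List String) : Int :=
  let lenA : Int := (A.length : Int)
  let len0 : Int := ((pvRow A 0).length : Int)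
  (PySem.List.pyRange 0 len0 1).foldl
    (fun limit i =>
      let st := (PySem.List.pyRange 0 lenA 1).foldl
        (fun (st : Int × Int) j =>
          let temp := if pvCharAt A j i = '.' then st.1 + 1 else 0
          (temp, max temp st.2)) (0, 0)
      min limit st.2)
    (min lenA len0)

-- check_move(s_x, s_y, s, A)
def checkMove (sx sy s : Int) (A : List String) : Bool :=
  (PySem.List.pyRange 0 s 1).all (fun i =>
    (PySem.List.pyRange 0 s 1).all (fun j =>
      !(pvCharAt A (sx + i) (sy + j) = '*')))

def pvDx : List Int := [-1, 1, 0, 0]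
def pvDy : List Int := [0, 0, -1, 1]

-- the `while q:` loop (fuel-bounded; the fuel passed by loopA dominates the pop count)
def goA (A : List String) (i ex ey : Int) :
    Nat → List (Int × Int) → PySem.Dict (Int × Int) Int → Bool
  | 0, _, _ => false
  | fuel + 1, q, visited =>
    match q with
    | [] => false
    | _ :: _ =>
      let t := q.getLast!          -- t = q.pop()
      let q1 := q.dropLast
      if t = (ex, ey) then true
      else
        -- n_x, n_y written inline (n_x = t[0] + dx[j], n_y = t[1] + dy[j])
        let st := (PySem.List.pyRange 0 4 1).foldl
          (fun (st : List (Int × Int) × PySem.Dict (Int × Int) Int) j =>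
            if 0 ≤ t.1 + PySem.List.pyGetD pvDx j 0
                ∧ t.1 + PySem.List.pyGetD pvDx j 0 ≤ ex
                ∧ 0 ≤ t.2 + PySem.List.pyGetD pvDy j 0
                ∧ t.2 + PySem.List.pyGetD pvDy j 0 ≤ ey
                ∧ st.2.get? (t.1 + PySem.List.pyGetD pvDx j 0, t.2 + PySem.List.pyGetD pvDy j 0) = none
                ∧ checkMove (t.1 + PySem.List.pyGetD pvDx j 0) (t.2 + PySem.List.pyGetD pvDy j 0) i A then
              (st.1 ++ [(t.1 + PySem.List.pyGetD pvDx j 0, t.2 + PySem.List.pyGetD pvDy j 0)],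
               st.2.insert (t.1 + PySem.List.pyGetD pvDx j 0, t.2 + PySem.List.pyGetD pvDy j 0) 1)
            else st) (q1, visited)
        goA A i ex ey fuel st.1 st.2

-- `for i in range(s, 0, -1): ...` with its early returns
def loopA (N M : Int) (A : List String) : List Int → Int
  | [] => 0
  | i :: rest =>
    let ex := N - i
    let ey := M - i
    if checkMove 0 0 i A then
      if goA A i ex ey ((ex + 1).toNat * (ey + 1).toNat + 2) [(0, 0)]
          (PySem.Dict.empty.insert (0, 0) 1) then i
      else loopA N M A rest
    else loopA N M A rest

def solution (N : Int) (M : Int) (A : List String) : Int :=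
  loopA N M A (PySem.List.pyRange (checkLimit A) 0 (-1))

-- ===== PORT B =====

-- running obstacle counts of one row (pref[1:] of Source B; acc is pref[-1])
def rowPrefAux : List Char → Int → List Int
  | [], _ => []
  | ch :: rest, acc =>
    let acc' := acc + (if ch = '*' then 1 else 0)
    acc' :: rowPrefAux rest acc'

def rowPref (cs : List Char) : List Int := 0 :: rowPrefAux cs 0

-- the prefix table P (zip truncates to C+1 as in Source B)
def buildP (A : List String) (C : Nat) : List (List Int) :=
  A.foldl
    (fun P row => P ++ [List.zipWith (· + ·) (P.getLast?.getD []) (rowPref row.toList)])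
    [List.replicate (C + 1) (0 : Int)]

def pvPGet (P : List (List Int)) (r c : Int) : Int :=
  PySem.List.pyGetD ((PySem.List.pyGet? P r).getD []) c 0

-- free(x, y, s)
def freeB (P : List (List Int)) (x y s : Int) : Bool :=
  decide (pvPGet P (x + s) (y + s) - pvPGet P x (y + s) - pvPGet P (x + s) y + pvPGet P x y = 0)

-- limit: per column, longest '.' run via the last obstacle index
def limitB (A : List String) : Int :=
  let R : Int := (A.length : Int)
  let C : Int := ((pvRow A 0).length : Int)
  (PySem.List.pyRange 0 C 1).foldl
    (fun limit c =>
      let st := (PySem.List.pyRange 0 R 1).foldl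
        (fun (st : Int × Int) r =>            -- (best, last)
          if ¬ (pvCharAt A r c = '.') then (st.1, r)
          else if r - st.2 > st.1 then (r - st.2, st.2)
          else st) (0, -1)
      min limit st.1)
    (min R C)

-- the `while stack:` loop of Source B
def goB (P : List (List Int)) (i ex ey : Int) :
    Nat → List (Int × Int) → PySem.Set (Int × Int) → Bool
  | 0, _, _ => false
  | fuel + 1, q, seen =>
    match q with
    | [] => false
    | _ :: _ =>
      let t := q.getLast!
      let q1 := q.dropLast
      if t = (ex, ey) then true
      else
        let st := [(t.1 - 1, t.2), (t.1 + 1, t.2), (t.1, t.2 - 1), (t.1, t.2 + 1)].foldl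
          (fun (st : List (Int × Int) × PySem.Set (Int × Int)) nb =>
            if 0 ≤ nb.1 ∧ nb.1 ≤ ex ∧ 0 ≤ nb.2 ∧ nb.2 ≤ ey ∧ ¬ nb ∈ st.2
                ∧ freeB P nb.1 nb.2 i then
              (st.1 ++ [nb], PySem.Set.add st.2 nb)
            else st) (q1, seen)
        goB P i ex ey fuel st.1 st.2

def loopB (N M : Int) (P : List (List Int)) : List Int → Int
  | [] => 0
  | s :: rest =>
    let ex := N - s
    let ey := M - s
    if freeB P 0 0 s then
      if goB P s ex ey ((ex + 1).toNat * (ey + 1).toNat + 2) [(0, 0)]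
          (PySem.Set.add PySem.Set.empty (0, 0)) then s
      else loopB N M P rest
    else loopB N M P rest

def solution_alt (N : Int) (M : Int) (A : List String) : Int :=
  let P := buildP A (pvRow A 0).length
  loopB N M P (PySem.List.pyRange (limitB A) 0 (-1))

-- ===== PRECONDITION & SPEC =====
-- Pre_ excludes the empty grid and ragged grids with a row shorter than row 0 (A raises
-- IndexError in check_limit there), and grids whose declared N or M exceeds the actual
-- row/column count unless the search provably cannot start (N ≤ 0, M ≤ 0, an empty first row,
-- or a column with no '.' forcing limit 0): on the remaining oversized-N/M grids A's inner
-- indexing raises IndexError exactly when the search reaches a position outside the real grid,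
-- which is not decidable in closed form.
def Pre_solution (N : Int) (M : Int) (A : List String) : Prop :=
  A ≠ [] ∧ (∀ r ∈ A, A.headI.toList.length ≤ r.toList.length) ∧
    ((N ≤ (A.length : Int) ∧ M ≤ (A.headI.toList.length : Int)) ∨ N ≤ 0 ∨ M ≤ 0 ∨
      A.headI.toList.length = 0 ∨
      (List.range A.headI.toList.length).any
        (fun c => A.all (fun row => !(row.toList.getD c ' ' == '.'))) = true)
instance (N : Int) (M : Int) (A : List String) : Decidable (Pre_solution N M A) := by
  unfold Pre_solution; infer_instance

def pvWitness_solution : Int × Int × List String := (2, 2, ["..", ".."])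

def Spec_solution (N : Int) (M : Int) (A : List String) (out : Int) : Prop := out = solution_alt N M A
instance (N : Int) (M : Int) (A : List String) (out : Int) : Decidable (Spec_solution N M A out) := by unfold Spec_solution; infer_instance

-- ===== CLAIM (what is proved, stated in full; the proofs are below) =====
def Claim_equal_solution : Prop := ∀ (N : Int) (M : Int) (A : List String), Dom_solution N M A → Pre_solution N M A → Spec_solution N M A (solution N M A)

-- ===== LEMMAS AND PROOFS =====

-- generic: a fold that only ever takes `min` with the accumulator never exceeds its start
theorem foldl_min_le {α : Type} (l : List α) (f : α → Int) :
    ∀ init : Int, l.foldl (fun acc x => min acc (f x)) init ≤ init := by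
  induction l with
  | nil => intro init; simp
  | cons x xs ih =>
    intro init
    exact le_trans (ih _) (by simp)

-- the two per-column folds: A's (temp, t_max) vs B's (best, last) track each other
theorem colfold_inv (A : List String) (i : Int) (n : Nat) :
    (((List.range n).map (fun k : Nat => (k : Int))).foldl
        (fun (st : Int × Int) j =>
          let temp := if pvCharAt A j i = '.' then st.1 + 1 else 0
          (temp, max temp st.2)) (0, 0)).1
      = (n : Int) - 1 -
        (((List.range n).map (fun k : Nat => (k : Int))).foldl
          (fun (st : Int × Int) r =>
            if ¬ (pvCharAt A r i = '.') then (st.1, r)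
            else if r - st.2 > st.1 then (r - st.2, st.2)
            else st) (0, -1)).2
    ∧ (((List.range n).map (fun k : Nat => (k : Int))).foldl
        (fun (st : Int × Int) j =>
          let temp := if pvCharAt A j i = '.' then st.1 + 1 else 0
          (temp, max temp st.2)) (0, 0)).2
      = (((List.range n).map (fun k : Nat => (k : Int))).foldl
          (fun (st : Int × Int) r =>
            if ¬ (pvCharAt A r i = '.') then (st.1, r)
            else if r - st.2 > st.1 then (r - st.2, st.2)
            else st) (0, -1)).1
    ∧ 0 ≤ (((List.range n).map (fun k : Nat => (k : Int))).foldl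
        (fun (st : Int × Int) j =>
          let temp := if pvCharAt A j i = '.' then st.1 + 1 else 0
          (temp, max temp st.2)) (0, 0)).2 := by
  induction n with
  | zero => simp
  | succ n ih =>
    obtain ⟨h1, h2, h3⟩ := ih
    simp only [List.range_succ, List.map_append, List.map_cons, List.map_nil,
      List.foldl_append, List.foldl_cons, List.foldl_nil]
    rcases hA : (((List.range n).map (fun k : Nat => (k : Int))).foldl
        (fun (st : Int × Int) j =>
          let temp := if pvCharAt A j i = '.' then st.1 + 1 else 0
          (temp, max temp st.2)) (0, 0)) with ⟨ta, ma⟩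
    rcases hB : (((List.range n).map (fun k : Nat => (k : Int))).foldl
        (fun (st : Int × Int) r =>
          if ¬ (pvCharAt A r i = '.') then (st.1, r)
          else if r - st.2 > st.1 then (r - st.2, st.2)
          else st) (0, -1)) with ⟨bb, lb⟩
    rw [hA, hB] at h1 h2
    rw [hA] at h3
    simp only at h1 h2 h3 ⊢
    by_cases hc : pvCharAt A (n : Int) i = '.'
    · rw [if_pos hc, if_neg (by simpa using hc)]
      by_cases hgt : (n : Int) - lb > bb
      · rw [if_pos hgt]
        dsimp only
        push_cast
        refine ⟨by omega, ?_, ?_⟩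
        · rw [max_eq_left (by omega)]; omega
        · exact le_max_of_le_right h3
      · rw [if_neg hgt]
        dsimp only
        push_cast
        refine ⟨by omega, ?_, ?_⟩
        · rw [max_eq_right (by omega)]; exact h2
        · exact le_max_of_le_right h3
    · rw [if_neg hc, if_pos (by simpa using hc)]
      dsimp only
      push_cast
      refine ⟨by omega, ?_, ?_⟩
      · rw [max_eq_right h3]; exact h2
      · exact le_max_of_le_right h3

-- A's check_limit and B's last-obstacle computation of the limit agree
theorem checkLimit_eq_limitB (A : List String) : checkLimit A = limitB A := by
  unfold checkLimit limitB
  simp only [PySem.List.pyRange_zero_nat]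
  apply PySem.List.foldl_congr_mem
  intro acc i hi
  congr 1
  exact (colfold_inv A i A.length).2.1

theorem checkLimit_le (A : List String) :
    checkLimit A ≤ min (A.length : Int) ((pvRow A 0).length : Int) := by
  unfold checkLimit
  exact foldl_min_le _ _ _

-- ---- prefix-table characterisation ----

-- number of '*' in the first c chars of a row
def segCnt (cs : List Char) (c : Nat) : Nat := (cs.take c).countP (fun ch => ch == '*')

-- number of '*' in rows [0, r), columns [0, c)
def rectCnt (A : List String) (r c : Nat) : Nat := ((A.take r).map (fun row => segCnt row.toList c)).sum

def tableFrom (t : List Int) : List String → List (List Int)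
  | [] => [t]
  | row :: rest => t :: tableFrom (List.zipWith (· + ·) t (rowPref row.toList)) rest

theorem foldl_build (rows : List String) :
    ∀ (Ppre : List (List Int)) (t : List Int),
      rows.foldl
        (fun P row => P ++ [List.zipWith (· + ·) (P.getLast?.getD []) (rowPref row.toList)])
        (Ppre ++ [t])
      = Ppre ++ tableFrom t rows := by
  induction rows with
  | nil => intro Ppre t; simp [tableFrom]
  | cons row rest ih =>
    intro Ppre t
    have h1 : (Ppre ++ [t]).getLast?.getD [] = t := by simp
    rw [List.foldl_cons, h1, ih (Ppre ++ [t]) _]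
    simp [tableFrom]

theorem buildP_eq (A : List String) (C : Nat) :
    buildP A C = tableFrom (List.replicate (C + 1) (0 : Int)) A := by
  have := foldl_build A [] (List.replicate (C + 1) (0 : Int))
  simpa [buildP] using this

theorem rowPrefAux_length : ∀ (cs : List Char) (a : Int), (rowPrefAux cs a).length = cs.length := by
  intro cs
  induction cs with
  | nil => intro a; simp [rowPrefAux]
  | cons c cs ih => intro a; simp [rowPrefAux, ih]

theorem rowPref_length (cs : List Char) : (rowPref cs).length = cs.length + 1 := by
  simp [rowPref, rowPrefAux_length]

theorem rowPrefAux_getD : ∀ (cs : List Char) (a : Int) (k : Nat), k < cs.length →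
    (rowPrefAux cs a).getD k 0 = a + (((cs.take (k + 1)).countP (fun ch => ch == '*') : Nat) : Int) := by
  intro cs
  induction cs with
  | nil => intro a k h; simp at h
  | cons c cs ih =>
    intro a k h
    cases k with
    | zero =>
      simp only [rowPrefAux, List.getD_cons_zero, List.take_succ_cons, List.take_zero,
        List.countP_cons, List.countP_nil]
      by_cases hc : c = '*' <;> simp [hc]
    | succ k =>
      simp only [rowPrefAux, List.getD_cons_succ]
      rw [ih _ k (by simpa using h)]
      simp only [List.take_succ_cons, List.countP_cons]
      by_cases hc : c = '*' <;> simp [hc] <;> push_cast <;> ring_nf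

theorem rowPref_getD (cs : List Char) (c : Nat) (hc : c ≤ cs.length) :
    (rowPref cs).getD c 0 = ((segCnt cs c : Nat) : Int) := by
  cases c with
  | zero => simp [rowPref, segCnt]
  | succ c =>
    simp only [rowPref, List.getD_cons_succ, segCnt]
    rw [rowPrefAux_getD cs 0 c (by omega)]
    simp

theorem tableFrom_length : ∀ (rows : List String) (t : List Int),
    (tableFrom t rows).length = rows.length + 1 := by
  intro rows
  induction rows with
  | nil => intro t; simp [tableFrom]
  | cons row rest ih => intro t; simp [tableFrom, ih]

-- the r-th row of the table, entry c, is the rectangle count plus the seed entry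
theorem tableFrom_getD (rows : List String) :
    ∀ (t : List Int) (C : Nat), t.length = C + 1 →
      (∀ row ∈ rows, C ≤ row.toList.length) →
      ∀ (r c : Nat), r ≤ rows.length → c ≤ C →
      ((tableFrom t rows).getD r []).getD c 0 = t.getD c 0 + ((rectCnt rows r c : Nat) : Int) := by
  induction rows with
  | nil =>
    intro t C ht hrows r c hr hc
    have hr0 : r = 0 := by simpa using hr
    subst hr0
    simp [tableFrom, rectCnt]
  | cons row rest ih =>
    intro t C ht hrows r c hr hc
    have hrow : C ≤ row.toList.length := hrows row (by simp)
    cases r with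
    | zero => simp [tableFrom, rectCnt]
    | succ r =>
      have hlen : (List.zipWith (· + ·) t (rowPref row.toList)).length = C + 1 := by
        rw [List.length_zipWith, ht, rowPref_length]
        omega
      simp only [tableFrom, List.getD_cons_succ]
      rw [ih _ C hlen (fun rr hrr => hrows rr (by simp [hrr])) r c (by simpa using hr) hc]
      have hct : c < t.length := by omega
      have hcz : c < (List.zipWith (· + ·) t (rowPref row.toList)).length := by omega
      have hcp : c < (rowPref row.toList).length := by rw [rowPref_length]; omega
      rw [List.getD_eq_getElem _ _ hcz, List.getElem_zipWith,
        ← List.getD_eq_getElem _ _ hct, ← List.getD_eq_getElem _ _ hcp]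
      rw [rowPref_getD _ _ (by omega)]
      have : rectCnt (row :: rest) (r + 1) c = segCnt row.toList c + rectCnt rest r c := by
        simp [rectCnt, List.take_succ_cons]
      rw [this]
      push_cast
      ring

theorem pGet_eq (A : List String) (C : Nat)
    (hrows : ∀ row ∈ A, C ≤ row.toList.length)
    (r c : Nat) (hr : r ≤ A.length) (hc : c ≤ C) :
    pvPGet (buildP A C) (r : Int) (c : Int) = ((rectCnt A r c : Nat) : Int) := by
  rw [buildP_eq]
  unfold pvPGet
  have hrT : r < (tableFrom (List.replicate (C + 1) (0 : Int)) A).length := by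
    rw [tableFrom_length]; omega
  rw [PySem.List.pyGet?_natCast, List.getElem?_eq_getElem hrT]
  simp only [Option.getD_some, PySem.List.pyGetD_natCast]
  rw [← List.getD_eq_getElem _ _ hrT]
  rw [tableFrom_getD A _ C (by simp) hrows r c hr hc]
  rw [List.getD_eq_getElem _ _ (by simp; omega), List.getElem_replicate]
  ring


theorem pvCharAt_natCast (A : List String) (j i : Nat) (hj : j < A.length)
    (hi : i < (A[j]'hj).toList.length) :
    pvCharAt A (j : Int) (i : Int) = (A[j]'hj).toList[i]'hi := by
  unfold pvCharAt pvRow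
  rw [show PySem.List.pyGet? A (j : Int) = some (A[j]'hj) from by
    rw [PySem.List.pyGet?_natCast]; exact List.getElem?_eq_getElem hj]
  simp only [Option.getD_some, PySem.List.pyGet?_natCast]
  rw [List.getElem?_eq_getElem hi]
  rfl

theorem rect_split (A : List String) (a n c : Nat) :
    rectCnt A (a + n) c = rectCnt A a c + (((A.drop a).take n).map (fun row => segCnt row.toList c)).sum := by
  unfold rectCnt
  rw [List.take_add, List.map_append, List.sum_append]

theorem seg_split (cs : List Char) (b n : Nat) :
    segCnt cs (b + n) = segCnt cs b + ((cs.drop b).take n).countP (fun ch => ch == '*') := by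
  unfold segCnt
  rw [List.take_add, List.countP_append]

theorem free_eq_checkMove (A : List String) (C : Nat)
    (hrows : ∀ row ∈ A, C ≤ row.toList.length)
    (x y s : Int) (hx : 0 ≤ x) (hy : 0 ≤ y) (hs : 0 ≤ s)
    (hxs : x + s ≤ (A.length : Int)) (hys : y + s ≤ (C : Int)) :
    freeB (buildP A C) x y s = checkMove x y s A := by
  obtain ⟨a, rfl⟩ : ∃ a : Nat, x = (a : Int) := ⟨x.toNat, (Int.toNat_of_nonneg hx).symm⟩
  obtain ⟨b, rfl⟩ : ∃ b : Nat, y = (b : Int) := ⟨y.toNat, (Int.toNat_of_nonneg hy).symm⟩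
  obtain ⟨n, rfl⟩ : ∃ n : Nat, s = (n : Int) := ⟨s.toNat, (Int.toNat_of_nonneg hs).symm⟩
  have han : a + n ≤ A.length := by exact_mod_cast (by push_cast at hxs ⊢; omega : ((a + n : Nat) : Int) ≤ (A.length : Int))
  have hbn : b + n ≤ C := by exact_mod_cast (by push_cast at hys ⊢; omega : ((b + n : Nat) : Int) ≤ (C : Int))
  unfold freeB checkMove
  rw [show (a : Int) + (n : Int) = ((a + n : Nat) : Int) by push_cast; ring,
      show (b : Int) + (n : Int) = ((b + n : Nat) : Int) by push_cast; ring]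
  rw [pGet_eq A C hrows (a + n) (b + n) han hbn,
      pGet_eq A C hrows a (b + n) (by omega) hbn,
      pGet_eq A C hrows (a + n) b han (by omega),
      pGet_eq A C hrows a b (by omega) (by omega)]
  -- the rectangle expression is the obstacle count of the square
  have hE : ((rectCnt A (a + n) (b + n) : Nat) : Int) - ((rectCnt A a (b + n) : Nat) : Int)
      - ((rectCnt A (a + n) b : Nat) : Int) + ((rectCnt A a b : Nat) : Int)
      = (((((A.drop a).take n).map
          (fun row => ((row.toList.drop b).take n).countP (fun ch => ch == '*'))).sum : Nat) : Int) := by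
    have hmap : ((A.drop a).take n).map (fun row => segCnt row.toList (b + n))
        = ((A.drop a).take n).map
            (fun row => segCnt row.toList b + ((row.toList.drop b).take n).countP (fun ch => ch == '*')) :=
      List.map_congr_left (fun row _ => seg_split row.toList b n)
    have hsplit : (((A.drop a).take n).map
        (fun row => segCnt row.toList b + ((row.toList.drop b).take n).countP (fun ch => ch == '*'))).sum
        = (((A.drop a).take n).map (fun row => segCnt row.toList b)).sum
          + (((A.drop a).take n).map
              (fun row => ((row.toList.drop b).take n).countP (fun ch => ch == '*'))).sum := by
      rw [← List.sum_map_add]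
    have h1 : rectCnt A (a + n) (b + n)
        = rectCnt A a (b + n) + ((((A.drop a).take n).map (fun row => segCnt row.toList b)).sum
          + (((A.drop a).take n).map
              (fun row => ((row.toList.drop b).take n).countP (fun ch => ch == '*'))).sum) := by
      rw [rect_split A a n (b + n), hmap, hsplit]
    have h2 : rectCnt A (a + n) b
        = rectCnt A a b + (((A.drop a).take n).map (fun row => segCnt row.toList b)).sum :=
      rect_split A a n b
    omega
  rw [hE]
  have hlenrows : ((A.drop a).take n).length = n := by
    rw [List.length_take, List.length_drop]
    omega
  -- the count is zero iff every cell of the square is not '*'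
  have key : (((A.drop a).take n).map
        (fun row => ((row.toList.drop b).take n).countP (fun ch => ch == '*'))).sum = 0
      ↔ ∀ i : Nat, i < n → ∀ j : Nat, j < n →
          ¬ pvCharAt A ((a : Int) + (i : Int)) ((b : Int) + (j : Int)) = '*' := by
    rw [List.sum_eq_zero_iff]
    constructor
    · intro hS i hi j hj
      have hai : a + i < A.length := by omega
      have hrowlen : C ≤ (A[a + i]'hai).toList.length := hrows _ (List.getElem_mem hai)
      have hseg : (((A[a + i]'hai).toList.drop b).take n).length = n := by
        rw [List.length_take, List.length_drop]
        omega
      have hbj : b + j < (A[a + i]'hai).toList.length := by omega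
      rw [show ((a : Int) + (i : Int)) = ((a + i : Nat) : Int) by push_cast; ring,
          show ((b : Int) + (j : Int)) = ((b + j : Nat) : Int) by push_cast; ring,
          pvCharAt_natCast A (a + i) (b + j) hai hbj]
      have hrow0 : ((A.drop a).take n)[i]'(by omega) = A[a + i]'hai := by
        rw [List.getElem_take, List.getElem_drop]
      have hcnt : (((A[a + i]'hai).toList.drop b).take n).countP (fun ch => ch == '*') = 0 := by
        apply hS
        refine List.mem_map.mpr ⟨A[a + i]'hai, ?_, rfl⟩
        rw [← hrow0]
        exact List.getElem_mem _
      have := (List.countP_eq_zero.mp hcnt) ((A[a + i]'hai).toList[b + j]'hbj) ?_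
      · simpa using this
      · have : (((A[a + i]'hai).toList.drop b).take n)[j]'(by omega) = (A[a + i]'hai).toList[b + j]'hbj := by
          rw [List.getElem_take, List.getElem_drop]
        rw [← this]
        exact List.getElem_mem _
    · intro hall v hv
      obtain ⟨row, hrowmem, rfl⟩ := List.mem_map.mp hv
      obtain ⟨i, hi, hroweq⟩ := List.mem_iff_getElem.mp hrowmem
      have hi' : i < n := by omega
      have hai : a + i < A.length := by omega
      have hrow0 : ((A.drop a).take n)[i]'hi = A[a + i]'hai := by
        rw [List.getElem_take, List.getElem_drop]
      subst hroweq
      rw [hrow0]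
      have hrowlen : C ≤ (A[a + i]'hai).toList.length := hrows _ (List.getElem_mem hai)
      apply List.countP_eq_zero.mpr
      intro ch hch
      obtain ⟨j, hj, hcheq⟩ := List.mem_iff_getElem.mp hch
      have hseg : (((A[a + i]'hai).toList.drop b).take n).length = n := by
        rw [List.length_take, List.length_drop]
        omega
      have hj' : j < n := by omega
      have hbj : b + j < (A[a + i]'hai).toList.length := by omega
      have hchv : ch = (A[a + i]'hai).toList[b + j]'hbj := by
        rw [← hcheq, List.getElem_take, List.getElem_drop]
      have := hall i hi' j hj'
      rw [show ((a : Int) + (i : Int)) = ((a + i : Nat) : Int) by push_cast; ring,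
          show ((b : Int) + (j : Int)) = ((b + j : Nat) : Int) by push_cast; ring,
          pvCharAt_natCast A (a + i) (b + j) hai hbj] at this
      simp [hchv, this]
  rw [Bool.eq_iff_iff]
  simp only [PySem.List.pyRange_zero_nat, List.all_map, List.all_eq_true, List.mem_range,
    Function.comp_apply, Bool.not_eq_true', decide_eq_false_iff_not, decide_eq_true_eq,
    Nat.cast_eq_zero]
  rw [key]

-- ---- the two worklist loops agree step for step ----

def relV (vA : PySem.Dict (Int × Int) Int) (vB : PySem.Set (Int × Int)) : Prop :=
  ∀ k : Int × Int, vA.get? k = none ↔ ¬ k ∈ vB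

theorem rel_insert_add (vA : PySem.Dict (Int × Int) Int) (vB : PySem.Set (Int × Int))
    (hrel : relV vA vB) (nb : Int × Int) (v : Int) :
    relV (vA.insert nb v) (PySem.Set.add vB nb) := by
  intro k
  rw [PySem.Dict.get?_insert]
  by_cases hk : k = nb
  · simp [hk, PySem.Set.mem_add]
  · simp [hk, PySem.Set.mem_add, hrel k]

-- one guarded neighbour step of the two loops, on the same candidate cell
theorem step_one (A : List String) (P : List (List Int)) (i ex ey : Int)
    (hchk : ∀ x y : Int, 0 ≤ x → x ≤ ex → 0 ≤ y → y ≤ ey →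
      checkMove x y i A = freeB P x y i)
    (q : List (Int × Int)) (vA : PySem.Dict (Int × Int) Int) (vB : PySem.Set (Int × Int))
    (hrel : relV vA vB) (nb : Int × Int) :
    (if 0 ≤ nb.1 ∧ nb.1 ≤ ex ∧ 0 ≤ nb.2 ∧ nb.2 ≤ ey ∧ vA.get? nb = none ∧ checkMove nb.1 nb.2 i A
      then (q ++ [nb], vA.insert nb 1) else (q, vA)).1
      = (if 0 ≤ nb.1 ∧ nb.1 ≤ ex ∧ 0 ≤ nb.2 ∧ nb.2 ≤ ey ∧ ¬ nb ∈ vB ∧ freeB P nb.1 nb.2 i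
      then (q ++ [nb], PySem.Set.add vB nb) else (q, vB)).1
    ∧ relV
      (if 0 ≤ nb.1 ∧ nb.1 ≤ ex ∧ 0 ≤ nb.2 ∧ nb.2 ≤ ey ∧ vA.get? nb = none ∧ checkMove nb.1 nb.2 i A
        then (q ++ [nb], vA.insert nb 1) else (q, vA)).2
      (if 0 ≤ nb.1 ∧ nb.1 ≤ ex ∧ 0 ≤ nb.2 ∧ nb.2 ≤ ey ∧ ¬ nb ∈ vB ∧ freeB P nb.1 nb.2 i
        then (q ++ [nb], PySem.Set.add vB nb) else (q, vB)).2 := by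
  have hiff : (0 ≤ nb.1 ∧ nb.1 ≤ ex ∧ 0 ≤ nb.2 ∧ nb.2 ≤ ey ∧ vA.get? nb = none ∧ checkMove nb.1 nb.2 i A)
      ↔ (0 ≤ nb.1 ∧ nb.1 ≤ ex ∧ 0 ≤ nb.2 ∧ nb.2 ≤ ey ∧ ¬ nb ∈ vB ∧ freeB P nb.1 nb.2 i) := by
    constructor
    · rintro ⟨h1, h2, h3, h4, h5, h6⟩
      exact ⟨h1, h2, h3, h4, (hrel nb).mp h5, by rw [← hchk nb.1 nb.2 h1 h2 h3 h4]; exact h6⟩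
    · rintro ⟨h1, h2, h3, h4, h5, h6⟩
      exact ⟨h1, h2, h3, h4, (hrel nb).mpr h5, by rw [hchk nb.1 nb.2 h1 h2 h3 h4]; exact h6⟩
  by_cases hc : 0 ≤ nb.1 ∧ nb.1 ≤ ex ∧ 0 ≤ nb.2 ∧ nb.2 ≤ ey ∧ vA.get? nb = none ∧ checkMove nb.1 nb.2 i A
  · rw [if_pos hc, if_pos (hiff.mp hc)]
    exact ⟨rfl, rel_insert_add vA vB hrel nb 1⟩
  · rw [if_neg hc, if_neg (fun h => hc (hiff.mpr h))]
    exact ⟨rfl, hrel⟩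

-- the two neighbour folds over the same candidate list keep the states related
theorem fold_pairs (A : List String) (P : List (List Int)) (i ex ey : Int)
    (hchk : ∀ x y : Int, 0 ≤ x → x ≤ ex → 0 ≤ y → y ≤ ey →
      checkMove x y i A = freeB P x y i) :
    ∀ (nbs : List (Int × Int)) (q : List (Int × Int)) (vA : PySem.Dict (Int × Int) Int)
      (vB : PySem.Set (Int × Int)), relV vA vB →
      (nbs.foldl (fun (st : List (Int × Int) × PySem.Dict (Int × Int) Int) nb =>
          if 0 ≤ nb.1 ∧ nb.1 ≤ ex ∧ 0 ≤ nb.2 ∧ nb.2 ≤ ey ∧ st.2.get? nb = none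
              ∧ checkMove nb.1 nb.2 i A then
            (st.1 ++ [nb], st.2.insert nb 1)
          else st) (q, vA)).1
        = (nbs.foldl (fun (st : List (Int × Int) × PySem.Set (Int × Int)) nb =>
          if 0 ≤ nb.1 ∧ nb.1 ≤ ex ∧ 0 ≤ nb.2 ∧ nb.2 ≤ ey ∧ ¬ nb ∈ st.2
              ∧ freeB P nb.1 nb.2 i then
            (st.1 ++ [nb], PySem.Set.add st.2 nb)
          else st) (q, vB)).1
      ∧ relV
        (nbs.foldl (fun (st : List (Int × Int) × PySem.Dict (Int × Int) Int) nb =>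
          if 0 ≤ nb.1 ∧ nb.1 ≤ ex ∧ 0 ≤ nb.2 ∧ nb.2 ≤ ey ∧ st.2.get? nb = none
              ∧ checkMove nb.1 nb.2 i A then
            (st.1 ++ [nb], st.2.insert nb 1)
          else st) (q, vA)).2
        (nbs.foldl (fun (st : List (Int × Int) × PySem.Set (Int × Int)) nb =>
          if 0 ≤ nb.1 ∧ nb.1 ≤ ex ∧ 0 ≤ nb.2 ∧ nb.2 ≤ ey ∧ ¬ nb ∈ st.2
              ∧ freeB P nb.1 nb.2 i then
            (st.1 ++ [nb], PySem.Set.add st.2 nb)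
          else st) (q, vB)).2 := by
  intro nbs
  induction nbs with
  | nil => intro q vA vB hrel; exact ⟨rfl, hrel⟩
  | cons nb rest ih =>
    intro q vA vB hrel
    simp only [List.foldl_cons]
    obtain ⟨hq, hrel'⟩ := step_one A P i ex ey hchk q vA vB hrel nb
    rcases hA : (if 0 ≤ nb.1 ∧ nb.1 ≤ ex ∧ 0 ≤ nb.2 ∧ nb.2 ≤ ey ∧ vA.get? nb = none
        ∧ checkMove nb.1 nb.2 i A then (q ++ [nb], vA.insert nb 1) else (q, vA)) with ⟨qA', vA'⟩
    rcases hB : (if 0 ≤ nb.1 ∧ nb.1 ≤ ex ∧ 0 ≤ nb.2 ∧ nb.2 ≤ ey ∧ ¬ nb ∈ vB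
        ∧ freeB P nb.1 nb.2 i then (q ++ [nb], PySem.Set.add vB nb) else (q, vB)) with ⟨qB', vB'⟩
    rw [hA, hB] at hq hrel'
    simp only at hq hrel'
    subst hq
    exact ih qA' vA' vB' hrel'

theorem go_congr (A : List String) (P : List (List Int)) (i ex ey : Int)
    (hchk : ∀ x y : Int, 0 ≤ x → x ≤ ex → 0 ≤ y → y ≤ ey →
      checkMove x y i A = freeB P x y i) :
    ∀ (fuel : Nat) (q : List (Int × Int)) (vA : PySem.Dict (Int × Int) Int)
      (vB : PySem.Set (Int × Int)), relV vA vB →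
      goA A i ex ey fuel q vA = goB P i ex ey fuel q vB := by
  intro fuel
  induction fuel with
  | zero => intro q vA vB _; rfl
  | succ fuel ih =>
    intro q vA vB hrel
    cases q with
    | nil => rfl
    | cons t0 rest =>
      show (if (t0 :: rest).getLast! = (ex, ey) then true else _)
          = (if (t0 :: rest).getLast! = (ex, ey) then true else _)
      by_cases ht : (t0 :: rest).getLast! = (ex, ey)
      · rw [if_pos ht, if_pos ht]
      · rw [if_neg ht, if_neg ht]
        set t := (t0 :: rest).getLast! with hts
        have hAfold :
            (PySem.List.pyRange 0 4 1).foldl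
              (fun (st : List (Int × Int) × PySem.Dict (Int × Int) Int) j =>
                if 0 ≤ t.1 + PySem.List.pyGetD pvDx j 0
                    ∧ t.1 + PySem.List.pyGetD pvDx j 0 ≤ ex
                    ∧ 0 ≤ t.2 + PySem.List.pyGetD pvDy j 0
                    ∧ t.2 + PySem.List.pyGetD pvDy j 0 ≤ ey
                    ∧ st.2.get? (t.1 + PySem.List.pyGetD pvDx j 0, t.2 + PySem.List.pyGetD pvDy j 0) = none
                    ∧ checkMove (t.1 + PySem.List.pyGetD pvDx j 0) (t.2 + PySem.List.pyGetD pvDy j 0) i A then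
                  (st.1 ++ [(t.1 + PySem.List.pyGetD pvDx j 0, t.2 + PySem.List.pyGetD pvDy j 0)],
                   st.2.insert (t.1 + PySem.List.pyGetD pvDx j 0, t.2 + PySem.List.pyGetD pvDy j 0) 1)
                else st) ((t0 :: rest).dropLast, vA)
            = [(t.1 - 1, t.2), (t.1 + 1, t.2), (t.1, t.2 - 1), (t.1, t.2 + 1)].foldl
              (fun (st : List (Int × Int) × PySem.Dict (Int × Int) Int) nb =>
                if 0 ≤ nb.1 ∧ nb.1 ≤ ex ∧ 0 ≤ nb.2 ∧ nb.2 ≤ ey ∧ st.2.get? nb = none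
                    ∧ checkMove nb.1 nb.2 i A then
                  (st.1 ++ [nb], st.2.insert nb 1)
                else st) ((t0 :: rest).dropLast, vA) := by
          have e4 : PySem.List.pyRange 0 4 1 = [0, 1, 2, 3] := by decide
          have d0 : PySem.List.pyGetD pvDx (0 : Int) 0 = -1 := by decide
          have d1 : PySem.List.pyGetD pvDx (1 : Int) 0 = 1 := by decide
          have d2 : PySem.List.pyGetD pvDx (2 : Int) 0 = 0 := by decide
          have d3 : PySem.List.pyGetD pvDx (3 : Int) 0 = 0 := by decide
          have e0 : PySem.List.pyGetD pvDy (0 : Int) 0 = 0 := by decide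
          have e1 : PySem.List.pyGetD pvDy (1 : Int) 0 = 0 := by decide
          have e2 : PySem.List.pyGetD pvDy (2 : Int) 0 = -1 := by decide
          have e3 : PySem.List.pyGetD pvDy (3 : Int) 0 = 1 := by decide
          have h1 : ((PySem.List.pyRange 0 4 1).map
                (fun j => (t.1 + PySem.List.pyGetD pvDx j 0, t.2 + PySem.List.pyGetD pvDy j 0))).foldl
              (fun (st : List (Int × Int) × PySem.Dict (Int × Int) Int) nb =>
                if 0 ≤ nb.1 ∧ nb.1 ≤ ex ∧ 0 ≤ nb.2 ∧ nb.2 ≤ ey ∧ st.2.get? nb = none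
                    ∧ checkMove nb.1 nb.2 i A then
                  (st.1 ++ [nb], st.2.insert nb 1)
                else st) ((t0 :: rest).dropLast, vA)
              = (PySem.List.pyRange 0 4 1).foldl
              (fun (st : List (Int × Int) × PySem.Dict (Int × Int) Int) j =>
                if 0 ≤ t.1 + PySem.List.pyGetD pvDx j 0
                    ∧ t.1 + PySem.List.pyGetD pvDx j 0 ≤ ex
                    ∧ 0 ≤ t.2 + PySem.List.pyGetD pvDy j 0
                    ∧ t.2 + PySem.List.pyGetD pvDy j 0 ≤ ey
                    ∧ st.2.get? (t.1 + PySem.List.pyGetD pvDx j 0, t.2 + PySem.List.pyGetD pvDy j 0) = none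
                    ∧ checkMove (t.1 + PySem.List.pyGetD pvDx j 0) (t.2 + PySem.List.pyGetD pvDy j 0) i A then
                  (st.1 ++ [(t.1 + PySem.List.pyGetD pvDx j 0, t.2 + PySem.List.pyGetD pvDy j 0)],
                   st.2.insert (t.1 + PySem.List.pyGetD pvDx j 0, t.2 + PySem.List.pyGetD pvDy j 0) 1)
                else st) ((t0 :: rest).dropLast, vA) :=
            List.foldl_map
          have h2 : (PySem.List.pyRange 0 4 1).map
                (fun j => (t.1 + PySem.List.pyGetD pvDx j 0, t.2 + PySem.List.pyGetD pvDy j 0))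
              = [(t.1 - 1, t.2), (t.1 + 1, t.2), (t.1, t.2 - 1), (t.1, t.2 + 1)] := by
            rw [e4]
            simp only [List.map_cons, List.map_nil, d0, d1, d2, d3, e0, e1, e2, e3]
            rw [show t.1 + (-1 : Int) = t.1 - 1 by ring, show t.2 + (-1 : Int) = t.2 - 1 by ring,
                show t.1 + (0 : Int) = t.1 by ring, show t.2 + (0 : Int) = t.2 by ring]
          rw [← h1, h2]
        rw [hAfold]
        obtain ⟨hq, hrel'⟩ := fold_pairs A P i ex ey hchk
          [(t.1 - 1, t.2), (t.1 + 1, t.2), (t.1, t.2 - 1), (t.1, t.2 + 1)]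
          ((t0 :: rest).dropLast) vA vB hrel
        rw [hq]
        exact ih _ _ _ hrel'

theorem foldl_min_le_mem {α : Type} (l : List α) (f : α → Int) (x : α) (hx : x ∈ l) :
    ∀ init : Int, l.foldl (fun acc y => min acc (f y)) init ≤ f x := by
  induction l with
  | nil => cases hx
  | cons y ys ih =>
    intro init
    rcases List.mem_cons.mp hx with rfl | hmem
    · exact le_trans (foldl_min_le ys f (min init (f x))) (min_le_right _ _)
    · exact ih hmem _

-- in a column with no '.', B's best-run accumulator stays 0
theorem colfold_allbad (A : List String) (c : Int) :
    ∀ n : Nat, (∀ j : Nat, j < n → ¬ pvCharAt A (j : Int) c = '.') →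
      (((List.range n).map (fun k : Nat => (k : Int))).foldl
        (fun (st : Int × Int) r =>
          if ¬ (pvCharAt A r c = '.') then (st.1, r)
          else if r - st.2 > st.1 then (r - st.2, st.2)
          else st) (0, -1)).1 = 0 := by
  intro n
  induction n with
  | zero => intro _; rfl
  | succ n ih =>
    intro hbad
    simp only [List.range_succ, List.map_append, List.map_cons, List.map_nil,
      List.foldl_append, List.foldl_cons, List.foldl_nil]
    rw [if_pos (hbad n (by omega))]
    exact ih (fun j hj => hbad j (by omega))

-- a column with no '.' forces the limit to 0
theorem limitB_nonpos (A : List String) (c : Nat) (hc : c < (pvRow A 0).length)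
    (hbad : ∀ j : Nat, j < A.length → ¬ pvCharAt A (j : Int) (c : Int) = '.') :
    limitB A ≤ 0 := by
  unfold limitB
  simp only [PySem.List.pyRange_zero_nat]
  have hmem : ((c : Int)) ∈ (List.range (pvRow A 0).length).map (fun k : Nat => (k : Int)) :=
    List.mem_map.mpr ⟨c, List.mem_range.mpr hc, rfl⟩
  refine le_trans (foldl_min_le_mem _ _ _ hmem _) ?_
  rw [colfold_allbad A (c : Int) A.length hbad]

theorem loop_congr (N M : Int) (A : List String) (C : Nat)
    (hrows : ∀ row ∈ A, C ≤ row.toList.length)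
    (hsafe : (N ≤ (A.length : Int) ∧ M ≤ (C : Int)) ∨ N ≤ 0 ∨ M ≤ 0) :
    ∀ is : List Int, (∀ i ∈ is, 0 < i ∧ i ≤ (A.length : Int) ∧ i ≤ (C : Int)) →
      loopA N M A is = loopB N M (buildP A C) is := by
  intro is
  induction is with
  | nil => intro _; rfl
  | cons i rest ih =>
    intro h
    obtain ⟨hi0, hiR, hiC⟩ := h i (by simp)
    have hchk : ∀ x y : Int, 0 ≤ x → x ≤ N - i → 0 ≤ y → y ≤ M - i →
        checkMove x y i A = freeB (buildP A C) x y i := by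
      intro x y hx hxe hy hye
      rcases hsafe with ⟨hN, hM⟩ | hN0 | hM0
      · exact (free_eq_checkMove A C hrows x y i hx hy (by omega) (by omega) (by omega)).symm
      · exact absurd hxe (by omega)
      · exact absurd hye (by omega)
    have hchk0 : checkMove 0 0 i A = freeB (buildP A C) 0 0 i :=
      (free_eq_checkMove A C hrows 0 0 i le_rfl le_rfl (by omega) (by omega) (by omega)).symm
    have hrel0 : relV (PySem.Dict.empty.insert ((0 : Int), (0 : Int)) 1)
        (PySem.Set.add PySem.Set.empty ((0 : Int), (0 : Int))) := by
      intro k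
      rw [PySem.Dict.get?_insert]
      by_cases hk : k = ((0 : Int), (0 : Int))
      · simp [hk, PySem.Set.empty]
      · simp [hk, PySem.Set.empty, PySem.Dict.get?_empty]
    have htail : loopA N M A rest = loopB N M (buildP A C) rest :=
      ih (fun j hj => h j (by simp [hj]))
    show (if checkMove 0 0 i A then _ else _) = (if freeB (buildP A C) 0 0 i then _ else _)
    rw [← hchk0]
    by_cases hc : checkMove 0 0 i A
    · rw [if_pos hc, if_pos hc]
      have hgo := go_congr A (buildP A C) i (N - i) (M - i) hchk
        ((N - i + 1).toNat * (M - i + 1).toNat + 2) [((0 : Int), (0 : Int))]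
        (PySem.Dict.empty.insert ((0 : Int), (0 : Int)) 1)
        (PySem.Set.add PySem.Set.empty ((0 : Int), (0 : Int))) hrel0
      show (if goA A i (N - i) (M - i) _ _ _ then i else loopA N M A rest)
          = (if goB (buildP A C) i (N - i) (M - i) _ _ _ then i else loopB N M (buildP A C) rest)
      rw [hgo]
      by_cases hf : goB (buildP A C) i (N - i) (M - i)
          ((N - i + 1).toNat * (M - i + 1).toNat + 2) [((0 : Int), (0 : Int))]
          (PySem.Set.add PySem.Set.empty ((0 : Int), (0 : Int)))
      · rw [if_pos hf, if_pos hf]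
      · rw [if_neg hf, if_neg hf]
        exact htail
    · rw [if_neg hc, if_neg hc]
      exact htail

-- ===== VERDICT (by name: the statement is the Claim_ definition above) =====
theorem solution_spec : Claim_equal_solution := by
  intro N M A hdom hpre
  obtain ⟨hne, hrows, hdisj⟩ := hpre
  show solution N M A = solution_alt N M A
  have hrow0 : pvRow A 0 = A.headI.toList := by
    cases A with
    | nil => exact absurd rfl hne
    | cons h tl => simp [pvRow]
  by_cases hlim0 : limitB A ≤ 0
  · unfold solution solution_alt
    dsimp only
    rw [checkLimit_eq_limitB, PySem.List.pyRange_neg_one_eq_nil hlim0]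
    rfl
  · have hlim : limitB A ≤ min (A.length : Int) ((A.headI.toList.length : Nat) : Int) := by
      have := checkLimit_le A
      rw [checkLimit_eq_limitB, hrow0] at this
      exact this
    have hsafe : (N ≤ (A.length : Int) ∧ M ≤ ((A.headI.toList.length : Nat) : Int))
        ∨ N ≤ 0 ∨ M ≤ 0 := by
      rcases hdisj with h | h | h | h | h
      · exact Or.inl h
      · exact Or.inr (Or.inl h)
      · exact Or.inr (Or.inr h)
      · exfalso
        apply hlim0
        omega
      · exfalso
        apply hlim0
        obtain ⟨cI, hcmem, hcol⟩ := List.any_eq_true.mp h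
        have hc : cI < A.headI.toList.length := List.mem_range.mp hcmem
        refine limitB_nonpos A cI (by rw [hrow0]; exact hc) ?_
        intro j hj
        have hrowlen : A.headI.toList.length ≤ (A[j]'hj).toList.length :=
          hrows _ (List.getElem_mem hj)
        have hcj : cI < (A[j]'hj).toList.length := by omega
        rw [pvCharAt_natCast A j cI hj hcj]
        have := List.all_eq_true.mp hcol (A[j]'hj) (List.getElem_mem hj)
        simp only [Bool.not_eq_eq_eq_not, Bool.not_true, beq_eq_false_iff_ne, ne_eq] at this
        rw [List.getD_eq_getElem _ _ hcj] at this
        exact this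
    unfold solution solution_alt
    dsimp only
    rw [checkLimit_eq_limitB, hrow0]
    apply loop_congr N M A A.headI.toList.length hrows hsafe
    intro i hi
    rw [PySem.List.mem_pyRange_neg_one] at hi
    exact ⟨hi.1, by omega, by omega⟩
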